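-- pv_equiv track=rewrite | github.com/Holger1993/AdventOfCode2020 | AdventOfCode6.py | totAllYes
-- ===== SOURCE A (Python) =====
-- def totAllYes(answears):
--     if len(answears) == 1:
--         return len(answears[0])
--     else:
--         ref = answears[0]
--         answears.pop(0)
--         allyes = len(answears)
--         count = 0
--         for char in ref:
--             oneyes = 0
--             for ans in answears:
--                 if char in ans:
--                     oneyes = oneyes + 1
--             if oneyes == allyes:
--                 count = count + 1
--         return count
-- ===== SOURCE B (Python) =====
-- def totAllYes(answears):
--     if len(answears) == 1:
--         return len(answears[0])
--     ref = answears.pop(0)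
--     common = set(ref)
--     for ans in answears:
--         common &= set(ans)
--     return sum(1 for char in ref if char in common)
-- ===== Notes on version B (the rewrite author's own statement) =====
-- stated objective: alternative
-- what changed: Replaces the nested per-character scan over all answers (recounting membership for every ref char) with a single set intersection built once over the remaining answers, followed by one counting pass over ref.
-- outside the precondition, e.g. on totAllYes([]): A raises IndexError, B raises IndexError
import Mathlib
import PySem

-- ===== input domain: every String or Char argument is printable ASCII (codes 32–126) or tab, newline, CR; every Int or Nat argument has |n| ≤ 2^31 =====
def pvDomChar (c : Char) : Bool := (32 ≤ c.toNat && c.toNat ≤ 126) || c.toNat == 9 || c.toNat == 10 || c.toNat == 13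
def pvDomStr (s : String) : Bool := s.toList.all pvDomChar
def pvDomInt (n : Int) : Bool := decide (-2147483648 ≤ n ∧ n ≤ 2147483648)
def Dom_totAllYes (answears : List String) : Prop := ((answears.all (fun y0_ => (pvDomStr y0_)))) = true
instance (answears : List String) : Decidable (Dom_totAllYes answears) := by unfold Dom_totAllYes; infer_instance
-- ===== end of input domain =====

-- B replaces A's nested per-character rescans with one set-intersection built once plus a single
-- counting pass over ref (return-value equivalence; both versions pop the head element in place).

-- ===== PORT A =====
-- 'char in ans' on single characters is exactly list membership of the character.
def totAllYes (answears : List String) : Int :=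
  if answears.length == 1 then
    ((answears.headD "").toList.length : Int)
  else
    match answears with
    | [] => 0   -- unreachable under Pre_ (Python raises IndexError on [])
    | ref :: rest =>
      -- allyes = len(answears) after the pop = rest.length
      ref.toList.foldl (fun count c =>
        let oneyes : Int :=
          rest.foldl (fun o ans => if ans.toList.contains c then o + 1 else o) 0
        if oneyes == (rest.length : Int) then count + 1 else count) 0

-- ===== PORT B =====
def totAllYes_alt (answears : List String) : Int :=
  if answears.length == 1 then
    ((answears.headD "").toList.length : Int)
  else
    match answears with
    | [] => 0   -- unreachable under Pre_ (Python raises IndexError on [])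
    | ref :: rest =>
      let common : PySem.Set Char :=
        rest.foldl (fun s ans => PySem.Set.inter s (PySem.Set.ofList ans.toList))
          (PySem.Set.ofList ref.toList)
      ref.toList.foldl (fun cnt c => if PySem.Set.contains common c then cnt + 1 else cnt) 0

-- ===== PRECONDITION & SPEC =====
-- Pre_ excludes only the empty list, on which the Python A raises IndexError (answears[0]).
def Pre_totAllYes (answears : List String) : Prop := answears ≠ []
instance (answears : List String) : Decidable (Pre_totAllYes answears) := by
  unfold Pre_totAllYes; infer_instance
def pvWitness_totAllYes : List String := ["ab", "b"]
def Spec_totAllYes (answears : List String) (out : Int) : Prop := out = totAllYes_alt answears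
instance (answears : List String) (out : Int) : Decidable (Spec_totAllYes answears out) := by
  unfold Spec_totAllYes; infer_instance

-- ===== CLAIM (what is proved, stated in full; the proofs are below) =====
def Claim_equal_totAllYes : Prop := ∀ (answears : List String), Dom_totAllYes answears → Pre_totAllYes answears → Spec_totAllYes answears (totAllYes answears)

-- ===== LEMMAS AND PROOFS =====

-- A's inner loop from accumulator n computes n + countP.
theorem foldl_count_mem (c : Char) (rest : List String) (n : Int) :
    rest.foldl (fun o ans => if ans.toList.contains c then o + 1 else o) n
      = n + (rest.countP (fun ans => ans.toList.contains c) : Int) := by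
  induction rest generalizing n with
  | nil => simp
  | cons a l ih =>
      simp only [List.foldl_cons, List.countP_cons, ih]
      split_ifs with h
      · simp
        ring
      · simp

-- membership in B's iterated intersection
theorem mem_foldl_inter (c : Char) (rest : List String) (init : PySem.Set Char) :
    (c ∈ rest.foldl (fun s ans => PySem.Set.inter s (PySem.Set.ofList ans.toList)) init)
      ↔ c ∈ init ∧ ∀ ans ∈ rest, c ∈ ans.toList := by
  induction rest generalizing init with
  | nil => simp
  | cons a l ih =>
      simp only [List.foldl_cons, ih, PySem.Set.mem_inter, PySem.Set.mem_ofList,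
        List.mem_cons]
      constructor
      · rintro ⟨⟨h1, h2⟩, h3⟩
        refine ⟨h1, fun ans h => ?_⟩
        rcases h with h | h
        · exact h ▸ h2
        · exact h3 ans h
      · rintro ⟨h1, h2⟩
        exact ⟨⟨h1, h2 a (Or.inl rfl)⟩, fun ans h => h2 ans (Or.inr h)⟩

theorem totAllYes_spec' (answears : List String) (h : answears ≠ []) :
    totAllYes answears = totAllYes_alt answears := by
  unfold totAllYes totAllYes_alt
  split
  · rfl
  · match answears, h with
    | ref :: rest, _ =>
      apply PySem.List.foldl_congr_mem
      intro acc c hc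
      have hcount := foldl_count_mem c rest 0
      have hmem := mem_foldl_inter c rest (PySem.Set.ofList ref.toList)
      have hiff : (rest.countP (fun ans => ans.toList.contains c) = rest.length)
          ↔ ∀ ans ∈ rest, c ∈ ans.toList := by
        rw [List.countP_eq_length]
        simp
      simp only [hcount, zero_add, beq_iff_eq, PySem.Set.contains_iff, hmem,
        PySem.Set.mem_ofList]
      by_cases hall : ∀ ans ∈ rest, c ∈ ans.toList
      · have : (rest.countP (fun ans => ans.toList.contains c) : Int) = (rest.length : Int) := by
          exact_mod_cast hiff.mpr hall
        simp [hc]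
      · have : (rest.countP (fun ans => ans.toList.contains c) : Int) ≠ (rest.length : Int) := by
          intro hEq
          exact hall (hiff.mp (by exact_mod_cast hEq))
        simp [hall]

-- ===== VERDICT (by name: the statement is the Claim_ definition above) =====
theorem totAllYes_spec : Claim_equal_totAllYes := by
  intro answears _ hpre
  exact totAllYes_spec' answears hpre
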